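-- pv_equiv track=rewrite | github.com/june3780/source_code_GI_renewal | 3_making_verilog_for_graph.py | get_whoarewire
-- ===== SOURCE A (Python) =====
-- def get_whoarewire(All):
--     wirelist=list()
--
--     whoareclk=list()
--     for idx,ivalue in enumerate(All):
--         for kdx in range(len(All[ivalue])):
--             if 'net_name' in All[ivalue][kdx]:
--                 if All[ivalue][kdx]['net_name']=='clk':
--                     whoareclk.append(ivalue)
--
--     whoareinput=list()
--     for idx, ivalue in enumerate(All):
--         for kdx in range(len(All[ivalue])):
--             if 'net_name' in All[ivalue][kdx] and All[ivalue][kdx]['direction']=='INPUT' and ivalue not in whoareclk: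
--                 whoareinput.append(ivalue)
--
--     whoareoutput=list()
--     for idx, ivalue in enumerate(All):
--         for kdx in range(len(All[ivalue])):
--             if 'net_name' in All[ivalue][kdx] and All[ivalue][kdx]['direction']=='OUTPUT' and ivalue not in whoareclk:
--                 whoareoutput.append(ivalue)
--
--     for idx,ivalue in enumerate(All):
--         if ivalue not in whoareinput and ivalue not in whoareoutput and ivalue not in whoareclk:
--             wirelist.append(ivalue)
--
--
--
--     return wirelist
-- ===== SOURCE B (Python) =====
-- def get_whoarewire(All):
--     # Single pass: for each key, one scan of its element list computing three flags.
--     wirelist = []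
--     for key, elems in All.items():
--         is_clk = has_in = has_out = False
--         for elem in elems:
--             if 'net_name' in elem:
--                 d = elem['direction']
--                 if elem['net_name'] == 'clk':
--                     is_clk = True
--                 if d == 'INPUT':
--                     has_in = True
--                 if d == 'OUTPUT':
--                     has_out = True
--         if not is_clk and not has_in and not has_out:
--             wirelist.append(key)
--     return wirelist
-- ===== Notes on version B (the rewrite author's own statement) =====
-- stated objective: faster
-- what changed: Replaced four separate full scans of the dict (each doing a fresh lookup All[key] and, later, linear membership tests in the intermediate whoareclk/whoareinput/whoareoutput lists) by one pass over All.items() that computes three booleans per key in a single scan of its element list and appends directly.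
import Mathlib
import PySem

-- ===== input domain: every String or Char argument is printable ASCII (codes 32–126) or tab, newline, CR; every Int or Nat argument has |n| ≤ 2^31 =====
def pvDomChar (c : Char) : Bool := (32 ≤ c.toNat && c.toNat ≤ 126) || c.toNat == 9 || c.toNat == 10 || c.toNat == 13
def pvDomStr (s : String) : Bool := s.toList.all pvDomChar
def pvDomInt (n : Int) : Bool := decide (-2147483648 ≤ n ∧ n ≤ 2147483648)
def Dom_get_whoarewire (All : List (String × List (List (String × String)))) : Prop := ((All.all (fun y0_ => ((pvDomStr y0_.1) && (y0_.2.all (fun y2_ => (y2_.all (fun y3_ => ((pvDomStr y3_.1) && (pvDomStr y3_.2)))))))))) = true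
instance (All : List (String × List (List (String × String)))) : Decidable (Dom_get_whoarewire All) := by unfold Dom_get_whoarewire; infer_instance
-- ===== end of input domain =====

-- B fuses A's four scans of the dict into one pass computing three flags per key (faster by a constant factor / avoids quadratic membership tests).

-- ===== PORT A =====
def get_whoarewire (All : List (String × List (List (String × String)))) : List String :=
  let whoareclk : List String := All.foldl (fun acc p =>
    ((PySem.Dict.mk All).getD p.1 []).foldl (fun acc elem =>
      if (PySem.Dict.mk elem).contains "net_name" then
        if (PySem.Dict.mk elem).getD "net_name" "" == "clk" then acc ++ [p.1] else acc
      else acc) acc) []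
  let whoareinput : List String := All.foldl (fun acc p =>
    ((PySem.Dict.mk All).getD p.1 []).foldl (fun acc elem =>
      if (PySem.Dict.mk elem).contains "net_name"
          && (PySem.Dict.mk elem).getD "direction" "" == "INPUT"
          && !(whoareclk.contains p.1) then acc ++ [p.1] else acc) acc) []
  let whoareoutput : List String := All.foldl (fun acc p =>
    ((PySem.Dict.mk All).getD p.1 []).foldl (fun acc elem =>
      if (PySem.Dict.mk elem).contains "net_name"
          && (PySem.Dict.mk elem).getD "direction" "" == "OUTPUT"
          && !(whoareclk.contains p.1) then acc ++ [p.1] else acc) acc) []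
  All.foldl (fun acc p =>
    if !(whoareinput.contains p.1) && !(whoareoutput.contains p.1) && !(whoareclk.contains p.1)
    then acc ++ [p.1] else acc) []

-- ===== PORT B =====
-- flags = (is_clk, has_in, has_out), computed in one scan of the element list
def pvFlags (elems : List (List (String × String))) : Bool × Bool × Bool :=
  elems.foldl (fun f elem =>
    if (PySem.Dict.mk elem).contains "net_name" then
      let d := (PySem.Dict.mk elem).getD "direction" ""
      ((if (PySem.Dict.mk elem).getD "net_name" "" == "clk" then true else f.1),
       (if d == "INPUT" then true else f.2.1),
       (if d == "OUTPUT" then true else f.2.2))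
    else f) (false, false, false)

def get_whoarewire_alt (All : List (String × List (List (String × String)))) : List String :=
  All.foldl (fun acc p =>
    let f := pvFlags p.2
    if !f.1 && !f.2.1 && !f.2.2 then acc ++ [p.1] else acc) []

-- ===== PRECONDITION & SPEC =====
-- Pre_ excludes (a) assoc lists whose key list has duplicates, which no Python dict can present
-- (the Lean type admits them, but A's All[ivalue] lookup would then not denote the pair's own value),
-- and (b) inputs holding an element dict with 'net_name' but no 'direction', on which Python A
-- raises KeyError('direction') (and B raises too); inner element dicts must likewise be duplicate-free.
def Pre_get_whoarewire (All : List (String × List (List (String × String)))) : Prop :=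
  (All.map Prod.fst).Nodup ∧
  ∀ p ∈ All, ∀ elem ∈ p.2,
    (elem.map Prod.fst).Nodup ∧
    ((PySem.Dict.mk elem).contains "net_name" → (PySem.Dict.mk elem).contains "direction")

instance (All : List (String × List (List (String × String)))) : Decidable (Pre_get_whoarewire All) := by
  unfold Pre_get_whoarewire; infer_instance

def pvWitness_get_whoarewire : (List (String × List (List (String × String)))) :=
  [("a", [[("net_name", "clk"), ("direction", "INPUT")]]),
   ("b", [[("net_name", "y"), ("direction", "OUTPUT")]]),
   ("c", [[("foo", "bar")]]),
   ("d", [])]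

def Spec_get_whoarewire (All : List (String × List (List (String × String)))) (out : List String) : Prop := out = get_whoarewire_alt All
instance (All : List (String × List (List (String × String)))) (out : List String) : Decidable (Spec_get_whoarewire All out) := by unfold Spec_get_whoarewire; infer_instance

-- ===== CLAIM (what is proved, stated in full; the proofs are below) =====
def Claim_equal_get_whoarewire : Prop := ∀ (All : List (String × List (List (String × String)))), Dom_get_whoarewire All → Pre_get_whoarewire All → Spec_get_whoarewire All (get_whoarewire All)

-- ===== LEMMAS AND PROOFS =====

-- the three per-key tests, as predicates on one element dict
def pvCondClk (elem : List (String × String)) : Bool :=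
  (PySem.Dict.mk elem).contains "net_name" && (PySem.Dict.mk elem).getD "net_name" "" == "clk"
def pvCondIn (elem : List (String × String)) : Bool :=
  (PySem.Dict.mk elem).contains "net_name" && (PySem.Dict.mk elem).getD "direction" "" == "INPUT"
def pvCondOut (elem : List (String × String)) : Bool :=
  (PySem.Dict.mk elem).contains "net_name" && (PySem.Dict.mk elem).getD "direction" "" == "OUTPUT"

-- B's one-pass flag fold computes the three `any`s
theorem pvFlags_aux (elems : List (List (String × String))) (a b c : Bool) :
    elems.foldl (fun f elem =>
      if (PySem.Dict.mk elem).contains "net_name" then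
        let d := (PySem.Dict.mk elem).getD "direction" ""
        ((if (PySem.Dict.mk elem).getD "net_name" "" == "clk" then true else f.1),
         (if d == "INPUT" then true else f.2.1),
         (if d == "OUTPUT" then true else f.2.2))
      else f) (a, b, c)
    = (a || elems.any pvCondClk, b || elems.any pvCondIn, c || elems.any pvCondOut) := by
  induction elems generalizing a b c with
  | nil => simp
  | cons e es ih =>
    simp only [List.foldl_cons, List.any_cons]
    cases hn : (PySem.Dict.mk e).contains "net_name" <;>
      simp only [hn, if_true, Bool.false_and, Bool.true_and, ih,
        pvCondClk, pvCondIn, pvCondOut] <;>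
    cases hc : ((PySem.Dict.mk e).getD "net_name" "" == "clk") <;>
    cases hi : ((PySem.Dict.mk e).getD "direction" "" == "INPUT") <;>
    cases ho : ((PySem.Dict.mk e).getD "direction" "" == "OUTPUT") <;>
      simp

theorem pvFlags_eq (elems : List (List (String × String))) :
    pvFlags elems = (elems.any pvCondClk, elems.any pvCondIn, elems.any pvCondOut) := by
  unfold pvFlags
  rw [pvFlags_aux]
  simp

-- dict lookup of a member key, under unique keys
theorem pvLookup (All : List (String × List (List (String × String))))
    (hnd : (All.map Prod.fst).Nodup) {p : String × List (List (String × String))} (hp : p ∈ All) :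
    (PySem.Dict.mk All).getD p.1 [] = p.2 :=
  PySem.Dict.getD_of_mem_items _ (by simpa using hp) (by simpa using hnd) []

-- two members with the same key are the same pair, under unique keys
theorem pvUnique (All : List (String × List (List (String × String))))
    (hnd : (All.map Prod.fst).Nodup) {p q : String × List (List (String × String))}
    (hp : p ∈ All) (hq : q ∈ All) (h1 : p.1 = q.1) : p = q := by
  have h2 := PySem.Dict.get?_of_mem_items (PySem.Dict.mk All) (k := p.1) (v := p.2)
    (by simpa using hp) (by simpa using hnd)
  have h3 := PySem.Dict.get?_of_mem_items (PySem.Dict.mk All) (k := q.1) (v := q.2)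
    (by simpa using hq) (by simpa using hnd)
  rw [h1, h3] at h2
  exact Prod.ext h1 (Option.some.inj h2).symm

-- A's scans in flatMap form, and membership in them
def pvClkList (All : List (String × List (List (String × String)))) : List String :=
  All.flatMap (fun p => (p.2.filter pvCondClk).map (fun _ => p.1))

def pvDirList (All : List (String × List (List (String × String)))) (dir : String) : List String :=
  All.flatMap (fun p =>
    (p.2.filter (fun e =>
      (PySem.Dict.mk e).contains "net_name" && (PySem.Dict.mk e).getD "direction" "" == dir
        && !((pvClkList All).contains p.1))).map (fun _ => p.1))

theorem pvWhoareclk_eq (All : List (String × List (List (String × String))))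
    (hnd : (All.map Prod.fst).Nodup) :
    All.foldl (fun acc p =>
      ((PySem.Dict.mk All).getD p.1 []).foldl (fun acc elem =>
        if (PySem.Dict.mk elem).contains "net_name" then
          if (PySem.Dict.mk elem).getD "net_name" "" == "clk" then acc ++ [p.1] else acc
        else acc) acc) []
    = pvClkList All := by
  rw [PySem.List.foldl_congr_mem All _ (fun acc p => acc ++ (p.2.filter pvCondClk).map (fun _ => p.1)) []
    (fun acc p hp => by
      dsimp only
      rw [pvLookup All hnd hp, ← PySem.List.foldl_append_if pvCondClk (fun _ => p.1) p.2 acc]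
      refine PySem.List.foldl_congr_mem _ _ _ _ (fun acc e _ => ?_)
      cases hn : (PySem.Dict.mk e).contains "net_name" <;>
        cases hc : ((PySem.Dict.mk e).getD "net_name" "" == "clk") <;>
          simp [pvCondClk, hn, hc])]
  exact PySem.List.foldl_append_eq_flatMap _ _ _

theorem pvWhoaredir_eq (All : List (String × List (List (String × String))))
    (hnd : (All.map Prod.fst).Nodup) (dir : String) :
    All.foldl (fun acc p =>
      ((PySem.Dict.mk All).getD p.1 []).foldl (fun acc elem =>
        if (PySem.Dict.mk elem).contains "net_name"
            && (PySem.Dict.mk elem).getD "direction" "" == dir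
            && !((pvClkList All).contains p.1) then acc ++ [p.1] else acc) acc) []
    = pvDirList All dir := by
  rw [PySem.List.foldl_congr_mem All _
    (fun acc p => acc ++ (p.2.filter (fun e =>
      (PySem.Dict.mk e).contains "net_name" && (PySem.Dict.mk e).getD "direction" "" == dir
        && !((pvClkList All).contains p.1))).map (fun _ => p.1)) []
    (fun acc p hp => by
      dsimp only
      rw [pvLookup All hnd hp,
        ← PySem.List.foldl_append_if
          (fun e => (PySem.Dict.mk e).contains "net_name"
            && (PySem.Dict.mk e).getD "direction" "" == dir
            && !((pvClkList All).contains p.1)) (fun _ => p.1) p.2 acc])]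
  exact PySem.List.foldl_append_eq_flatMap _ _ _

-- membership in any such "append the key when an element passes" scan, under unique keys
theorem pvMem_flatMap (All : List (String × List (List (String × String))))
    (hnd : (All.map Prod.fst).Nodup)
    (C : (String × List (List (String × String))) → List (String × String) → Bool)
    {p : String × List (List (String × String))} (hp : p ∈ All) :
    (All.flatMap (fun q => (q.2.filter (C q)).map (fun _ => q.1))).contains p.1
      = p.2.any (C p) := by
  rcases h : p.2.any (C p) with _ | _
  · rw [Bool.eq_false_iff]
    intro hcon
    rw [List.contains_iff_mem] at hcon
    simp only [List.mem_flatMap, List.mem_map, List.mem_filter] at hcon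
    obtain ⟨q, hq, e, ⟨he, hce⟩, hkey⟩ := hcon
    cases pvUnique All hnd hq hp hkey
    rw [List.any_eq_false] at h
    exact absurd hce (by simpa using h e he)
  · rw [List.contains_iff_mem]
    simp only [List.any_eq_true] at h
    obtain ⟨e, he, hce⟩ := h
    simp only [List.mem_flatMap, List.mem_map, List.mem_filter]
    exact ⟨p, hp, e, ⟨he, hce⟩, rfl⟩

theorem pvMem_clkList (All : List (String × List (List (String × String))))
    (hnd : (All.map Prod.fst).Nodup) {p : String × List (List (String × String))} (hp : p ∈ All) :
    (pvClkList All).contains p.1 = p.2.any pvCondClk :=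
  pvMem_flatMap All hnd (fun _ => pvCondClk) hp

theorem pvMem_dirList (All : List (String × List (List (String × String))))
    (hnd : (All.map Prod.fst).Nodup) (dir : String)
    (cond : List (String × String) → Bool)
    (hcond : cond = fun e => (PySem.Dict.mk e).contains "net_name"
      && (PySem.Dict.mk e).getD "direction" "" == dir)
    {p : String × List (List (String × String))} (hp : p ∈ All) :
    (pvDirList All dir).contains p.1 = (p.2.any cond && !((pvClkList All).contains p.1)) := by
  subst hcond
  have h2 : pvDirList All dir = All.flatMap (fun q =>
      (q.2.filter ((fun q e => ((PySem.Dict.mk e).contains "net_name"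
        && (PySem.Dict.mk e).getD "direction" "" == dir)
        && !((pvClkList All).contains q.1)) q)).map (fun _ => q.1)) := rfl
  rw [h2, pvMem_flatMap All hnd _ hp]
  exact (List.and_any_distrib_right).symm

-- ===== VERDICT (by name: the statement is the Claim_ definition above) =====
theorem get_whoarewire_spec : Claim_equal_get_whoarewire := by
  intro All _ hPre
  obtain ⟨hnd, _⟩ := hPre
  unfold Spec_get_whoarewire get_whoarewire get_whoarewire_alt
  dsimp only
  rw [pvWhoareclk_eq All hnd, pvWhoaredir_eq All hnd "INPUT", pvWhoaredir_eq All hnd "OUTPUT"]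
  refine PySem.List.foldl_congr_mem All _ _ [] (fun acc p hp => ?_)
  dsimp only
  rw [pvFlags_eq, pvMem_clkList All hnd hp,
    pvMem_dirList All hnd "INPUT" pvCondIn rfl hp,
    pvMem_dirList All hnd "OUTPUT" pvCondOut rfl hp,
    pvMem_clkList All hnd hp]
  cases hc : p.2.any pvCondClk <;> cases hi : p.2.any pvCondIn <;> cases ho : p.2.any pvCondOut <;> simp
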